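-- pv_equiv track=rewrite | github.com/pillaiarunsasidharan/owasp-pysec | pysec/utils.py | xrange
-- ===== SOURCE A (Python) =====
-- import operator
--
-- def xrange(start, stop, step=1):
--     """This xrange use python's integers and have not limits of
--     machine integers."""
--     stop = int(stop)
--     step = int(step)
--     if step < 0:
--         start, stop = stop, start
--         bcmp = operator.gt
--     elif step > 0:
--         bcmp = operator.lt
--     else:
--         raise StopIteration
--     act = int(start)
--     while bcmp(act, stop):
--         yield act
--         act += step
-- ===== SOURCE B (Python) =====
-- def xrange(start, stop, step=1):
--     """Closed-form count: compute how many terms there are, then emit them by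
--     index.  On step == 0 (where the original raises) this yields nothing."""
--     start = int(start)
--     stop = int(stop)
--     step = int(step)
--     if step > 0:
--         first = start
--         n = -((start - stop) // step)        # ceil((stop-start)/step)
--     elif step < 0:
--         first = stop                         # the original swaps start/stop
--         n = -((start - stop) // (-step))     # ceil((start-stop)/(-step))
--     else:
--         first = 0
--         n = 0
--     for i in range(max(0, n)):
--         yield first + i * step
-- ===== Notes on version B (the rewrite author's own statement) =====
-- stated objective: alternative
-- what changed: B computes the number of terms in closed form by ceiling division and yields them by index (first + i*step), replacing A's per-step comparison while-loop; step==0, where A raises, is excluded by Pre_.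
import Mathlib
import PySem

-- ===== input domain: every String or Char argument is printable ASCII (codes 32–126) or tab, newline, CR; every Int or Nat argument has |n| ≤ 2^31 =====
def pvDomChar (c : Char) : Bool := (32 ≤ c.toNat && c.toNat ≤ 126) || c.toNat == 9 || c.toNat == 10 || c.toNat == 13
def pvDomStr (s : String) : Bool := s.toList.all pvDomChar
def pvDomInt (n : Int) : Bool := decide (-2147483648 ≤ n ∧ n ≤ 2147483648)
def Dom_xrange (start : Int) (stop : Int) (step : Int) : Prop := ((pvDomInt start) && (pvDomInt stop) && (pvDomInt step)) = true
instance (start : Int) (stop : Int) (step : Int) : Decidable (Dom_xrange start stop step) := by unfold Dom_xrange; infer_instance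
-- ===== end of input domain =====

-- B replaces A's per-step comparison loop by a closed-form term count plus indexed
-- emission (objective: alternative decomposition; same O(n) output cost).
-- A mutates nothing; the equivalence is about the yielded sequence (as a list).

-- ===== PORT A =====
-- A's while loop for step > 0 (bcmp = operator.lt): yield act while act < stop.
def xrangeUp (act stop step : Int) (h : 0 < step) : List Int :=
  if act < stop then act :: xrangeUp (act + step) stop step h else []
termination_by (stop - act).toNat
decreasing_by omega

-- A's while loop for step < 0 after the swap (bcmp = operator.gt): yield act while act > stop.
def xrangeDown (act stop step : Int) (h : step < 0) : List Int :=
  if stop < act then act :: xrangeDown (act + step) stop step h else []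
termination_by (act - stop).toNat
decreasing_by omega

def xrange (start : Int) (stop : Int) (step : Int) : List Int :=
  if h : step < 0 then
    -- start, stop = stop, start; bcmp = operator.gt
    xrangeDown stop start step h
  else if h2 : 0 < step then
    xrangeUp start stop step h2
  else
    []  -- step = 0: Python raises (StopIteration → RuntimeError); excluded by Pre_xrange

-- ===== PORT B =====
def xrange_alt (start : Int) (stop : Int) (step : Int) : List Int :=
  let fn : Int × Int :=
    if 0 < step then (start, -(PySem.Int.floordiv (start - stop) step))
    else if step < 0 then (stop, -(PySem.Int.floordiv (start - stop) (-step)))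
    else (0, 0)
  (List.range (max 0 fn.2).toNat).map (fun (i : Nat) => fn.1 + (i : Int) * step)

-- ===== PRECONDITION & SPEC =====
-- Pre_ excludes step = 0, on which the Python A raises (StopIteration inside a
-- generator, i.e. RuntimeError on iteration).
def Pre_xrange (start : Int) (stop : Int) (step : Int) : Prop := step ≠ 0
instance (start : Int) (stop : Int) (step : Int) : Decidable (Pre_xrange start stop step) := by unfold Pre_xrange; infer_instance
def pvWitness_xrange : Int × Int × Int := (3, 10, 2)

def Spec_xrange (start : Int) (stop : Int) (step : Int) (out : List Int) : Prop := out = xrange_alt start stop step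
instance (start : Int) (stop : Int) (step : Int) (out : List Int) : Decidable (Spec_xrange start stop step out) := by unfold Spec_xrange; infer_instance

-- ===== CLAIM (what is proved, stated in full; the proofs are below) =====
def Claim_equal_xrange : Prop := ∀ (start : Int) (stop : Int) (step : Int), Dom_xrange start stop step → Pre_xrange start stop step → Spec_xrange start stop step (xrange start stop step)

-- ===== LEMMAS AND PROOFS =====

-- ceiling count for the ascending loop: number of terms from act (exclusive bound stop)
theorem xrangeUp_closed (step : Int) (h : 0 < step) : ∀ (n : Nat) (act stop : Int),
    (max 0 (-(PySem.Int.floordiv (act - stop) step))).toNat = n →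
    xrangeUp act stop step h = (List.range n).map (fun (i : Nat) => act + (i : Int) * step) := by
  intro n
  induction n with
  | zero =>
    intro act stop hn
    have h0 : 0 ≤ PySem.Int.floordiv (act - stop) step := by omega
    have hle : stop ≤ act := by
      by_contra hlt
      have : PySem.Int.floordiv (act - stop) step < 0 := by
        rw [PySem.Int.floordiv_lt_iff_lt_mul h]; omega
      omega
    rw [xrangeUp]; simp [not_lt.mpr hle]
  | succ n ih =>
    intro act stop hn
    have hfd := (PySem.Int.floordiv_eq_iff_of_pos (a := act - stop) (b := step) h).mp rfl
    have hq : PySem.Int.floordiv (act - stop) step = -((n : Int) + 1) := by omega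
    rw [hq] at hfd
    have hlt : act < stop := by nlinarith [hfd.1, hfd.2]
    have hrec : (max 0 (-(PySem.Int.floordiv (act + step - stop) step))).toNat = n := by
      have : PySem.Int.floordiv (act + step - stop) step
           = PySem.Int.floordiv (act - stop) step + 1 := by
        rw [hq, PySem.Int.floordiv_eq_iff_of_pos h]
        constructor <;> nlinarith [hfd.1, hfd.2]
      omega
    rw [xrangeUp]; simp only [if_pos hlt, ih (act + step) stop hrec]
    rw [List.range_succ_eq_map, List.map_cons, List.map_map]
    congr 1
    · push_cast; ring
    · apply List.map_congr_left; intro i _; simp [Function.comp]; push_cast; ring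

-- the descending loop is the ascending count with divisor -step: terms act + i*step while act > stop
theorem xrangeDown_closed (step : Int) (h : step < 0) : ∀ (n : Nat) (act stop : Int),
    (max 0 (-(PySem.Int.floordiv (stop - act) (-step)))).toNat = n →
    xrangeDown act stop step h = (List.range n).map (fun (i : Nat) => act + (i : Int) * step) := by
  intro n
  induction n with
  | zero =>
    intro act stop hn
    have hpos : 0 < -step := by omega
    have hle : act ≤ stop := by
      by_contra hlt
      have : PySem.Int.floordiv (stop - act) (-step) < 0 := by
        rw [PySem.Int.floordiv_lt_iff_lt_mul hpos]; omega
      omega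
    rw [xrangeDown]; simp [not_lt.mpr hle]
  | succ n ih =>
    intro act stop hn
    have hpos : 0 < -step := by omega
    have hfd := (PySem.Int.floordiv_eq_iff_of_pos (a := stop - act) (b := -step) hpos).mp rfl
    have hq : PySem.Int.floordiv (stop - act) (-step) = -((n : Int) + 1) := by omega
    rw [hq] at hfd
    have hlt : stop < act := by nlinarith [hfd.1, hfd.2]
    have hrec : (max 0 (-(PySem.Int.floordiv (stop - (act + step)) (-step)))).toNat = n := by
      have : PySem.Int.floordiv (stop - (act + step)) (-step)
           = PySem.Int.floordiv (stop - act) (-step) + 1 := by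
        rw [hq, PySem.Int.floordiv_eq_iff_of_pos hpos]
        constructor <;> nlinarith [hfd.1, hfd.2]
      omega
    rw [xrangeDown]; simp only [if_pos hlt, ih (act + step) stop hrec]
    rw [List.range_succ_eq_map, List.map_cons, List.map_map]
    congr 1
    · push_cast; ring
    · apply List.map_congr_left; intro i _; simp [Function.comp]; push_cast; ring

-- ===== VERDICT (by name: the statement is the Claim_ definition above) =====
theorem xrange_spec : Claim_equal_xrange := by
  intro start stop step _ hpre
  unfold Spec_xrange xrange xrange_alt
  by_cases hneg : step < 0
  · have hpos : ¬ 0 < step := by omega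
    simp only [dif_pos hneg, if_neg hpos, if_pos hneg]
    exact xrangeDown_closed step hneg _ stop start rfl
  · have hpos : 0 < step := by unfold Pre_xrange at hpre; omega
    simp only [dif_neg hneg, dif_pos hpos, if_pos hpos]
    exact xrangeUp_closed step hpos _ start stop rfl
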